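-- pv_equiv track=rewrite | github.com/emmamrath/gene_annotation_of_structural_variants | create_images_for_deep_learning/images_for_deep_learning_sv02_create_non_white_space_mapping_file.py | sort_input
-- ===== SOURCE A (Python) =====
-- def sort_input( in1_chrom, in1_start, in1_end ):
--
-- 	order_of_chromosomes = ['1','2','3','4','5','6','7','8','9','10','11','12','13','14','15','16','17','18','19','20','21','22','X','Y','MT']
--
-- 	in2_chrom = []
-- 	in2_start = []
-- 	in2_end = []
-- 	for this_chrom in order_of_chromosomes:
-- 		for i in range( 0, len(in1_chrom) ):
-- 			if (in1_chrom[i] == this_chrom):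
-- 				in2_chrom.append( in1_chrom[i] )
-- 				in2_start.append( in1_start[i] )
-- 				in2_end.append( in1_end[i] )
--
-- 	return in2_chrom, in2_start, in2_end
-- ===== SOURCE B (Python) =====
-- def sort_input(in1_chrom, in1_start, in1_end):
--     order_of_chromosomes = ['1','2','3','4','5','6','7','8','9','10','11','12','13','14','15','16','17','18','19','20','21','22','X','Y','MT']
--     known = set(order_of_chromosomes)
--     buckets = {}
--     for i, ch in enumerate(in1_chrom):
--         if ch in known:
--             buckets.setdefault(ch, []).append(i)
--     idxs = [i for ch in order_of_chromosomes for i in buckets.get(ch, [])]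
--     return ([in1_chrom[i] for i in idxs],
--             [in1_start[i] for i in idxs],
--             [in1_end[i] for i in idxs])
-- ===== Notes on version B (the rewrite author's own statement) =====
-- stated objective: faster
-- what changed: Replaces A's 25 full scans of the input (one per canonical chromosome) with a single pass that groups indices into per-chromosome buckets, then concatenates the buckets in canonical order.
import Mathlib
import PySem

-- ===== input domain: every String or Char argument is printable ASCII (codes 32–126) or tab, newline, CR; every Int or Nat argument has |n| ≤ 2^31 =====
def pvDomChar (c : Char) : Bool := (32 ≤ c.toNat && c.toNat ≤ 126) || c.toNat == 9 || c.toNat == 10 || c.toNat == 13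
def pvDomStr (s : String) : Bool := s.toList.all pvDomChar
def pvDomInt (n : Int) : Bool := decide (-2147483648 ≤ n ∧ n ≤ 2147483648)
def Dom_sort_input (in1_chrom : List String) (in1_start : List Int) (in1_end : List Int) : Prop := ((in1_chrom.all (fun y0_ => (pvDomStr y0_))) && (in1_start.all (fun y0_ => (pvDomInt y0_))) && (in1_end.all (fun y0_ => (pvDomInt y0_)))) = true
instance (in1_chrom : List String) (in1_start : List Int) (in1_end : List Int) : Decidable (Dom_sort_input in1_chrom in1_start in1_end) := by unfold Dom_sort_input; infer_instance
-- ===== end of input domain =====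

-- B groups record indices into per-chromosome buckets in one pass and concatenates them in
-- canonical order, instead of A's one full scan of the input per canonical chromosome.


def orderOfChromosomes : List String :=
  ["1","2","3","4","5","6","7","8","9","10","11","12","13","14","15","16","17","18","19","20","21","22","X","Y","MT"]

-- ===== PORT A =====
-- outer loop over the canonical chromosomes, inner loop over range(0, len(in1_chrom))
def sort_input (in1_chrom : List String) (in1_start : List Int) (in1_end : List Int) : List String × List Int × List Int :=
  orderOfChromosomes.foldl (fun acc this_chrom =>
    (PySem.List.pyRange 0 (in1_chrom.length : Int) 1).foldl (fun acc2 i =>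
      if PySem.List.pyGetD in1_chrom i "" == this_chrom then
        (acc2.1 ++ [PySem.List.pyGetD in1_chrom i ""],
         acc2.2.1 ++ [PySem.List.pyGetD in1_start i 0],
         acc2.2.2 ++ [PySem.List.pyGetD in1_end i 0])
      else acc2) acc)
    ([], [], [])

-- ===== PORT B =====
-- one enumerate pass grouping indices into buckets (setdefault+append = Dict.modify with default []),
-- then the bucket lists are concatenated in canonical order and each output list is built by indexing
def sort_input_alt (in1_chrom : List String) (in1_start : List Int) (in1_end : List Int) : List String × List Int × List Int :=
  let known := PySem.Set.ofList orderOfChromosomes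
  let buckets : PySem.Dict String (List Int) :=
    (PySem.List.enumerate in1_chrom 0).foldl (fun d p =>
      if known.contains p.2 then d.modify p.2 [] (· ++ [p.1]) else d) PySem.Dict.empty
  let idxs : List Int := orderOfChromosomes.flatMap (fun ch => buckets.getD ch [])
  (idxs.map (fun i => PySem.List.pyGetD in1_chrom i ""),
   idxs.map (fun i => PySem.List.pyGetD in1_start i 0),
   idxs.map (fun i => PySem.List.pyGetD in1_end i 0))

-- ===== PRECONDITION & SPEC =====
-- Pre_ excludes exactly the inputs where Python A raises IndexError: a position whose chromosome is
-- canonical but which is out of range for in1_start or in1_end.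
def Pre_sort_input (in1_chrom : List String) (in1_start : List Int) (in1_end : List Int) : Prop :=
  ∀ i : Nat, (h : i < in1_chrom.length) → in1_chrom[i] ∈ orderOfChromosomes →
    i < in1_start.length ∧ i < in1_end.length
instance (in1_chrom : List String) (in1_start : List Int) (in1_end : List Int) : Decidable (Pre_sort_input in1_chrom in1_start in1_end) := by unfold Pre_sort_input; infer_instance

def pvWitness_sort_input : List String × List Int × List Int :=
  (["X", "1", "weird", "1"], [10, 20, 30, 40], [11, 21, 31, 41])

def Spec_sort_input (in1_chrom : List String) (in1_start : List Int) (in1_end : List Int) (out : List String × List Int × List Int) : Prop := out = sort_input_alt in1_chrom in1_start in1_end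
instance (in1_chrom : List String) (in1_start : List Int) (in1_end : List Int) (out : List String × List Int × List Int) : Decidable (Spec_sort_input in1_chrom in1_start in1_end out) := by unfold Spec_sort_input; infer_instance

-- ===== CLAIM (what is proved, stated in full; the proofs are below) =====
def Claim_equal_sort_input : Prop := ∀ (in1_chrom : List String) (in1_start : List Int) (in1_end : List Int), Dom_sort_input in1_chrom in1_start in1_end → Pre_sort_input in1_chrom in1_start in1_end → Spec_sort_input in1_chrom in1_start in1_end (sort_input in1_chrom in1_start in1_end)

-- ===== LEMMAS AND PROOFS =====

-- the indices (as a pyRange sublist) whose chromosome equals tc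
def matchIdx (c : List String) (tc : String) : List Int :=
  (PySem.List.pyRange 0 (c.length : Int) 1).filter (fun i => PySem.List.pyGetD c i "" == tc)

-- A's inner loop appends, per component, the images of the matching indices
theorem inner_fold_eq {α β γ : Type} (l : List Int) (p : Int → Bool)
    (f : Int → α) (g : Int → β) (h : Int → γ) (acc : List α × List β × List γ) :
    l.foldl (fun a i => if p i then (a.1 ++ [f i], a.2.1 ++ [g i], a.2.2 ++ [h i]) else a) acc
      = (acc.1 ++ (l.filter p).map f, acc.2.1 ++ (l.filter p).map g, acc.2.2 ++ (l.filter p).map h) := by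
  induction l generalizing acc with
  | nil => simp
  | cons x xs ih =>
    by_cases hx : p x = true
    · simp [List.foldl_cons, hx, ih]
    · simp only [Bool.not_eq_true] at hx
      simp [List.foldl_cons, hx, ih]

-- A's outer loop concatenates the per-chromosome blocks
theorem outer_fold_eq {κ α β γ : Type} (ord : List κ)
    (M1 : κ → List α) (M2 : κ → List β) (M3 : κ → List γ) (acc : List α × List β × List γ) :
    ord.foldl (fun a tc => (a.1 ++ M1 tc, a.2.1 ++ M2 tc, a.2.2 ++ M3 tc)) acc
      = (acc.1 ++ ord.flatMap M1, acc.2.1 ++ ord.flatMap M2, acc.2.2 ++ ord.flatMap M3) := by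
  induction ord generalizing acc with
  | nil => simp
  | cons x xs ih => simp [List.foldl_cons, ih]

theorem sort_input_eq (c : List String) (s e : List Int) :
    sort_input c s e
      = (orderOfChromosomes.flatMap (fun tc => (matchIdx c tc).map (fun i => PySem.List.pyGetD c i "")),
         orderOfChromosomes.flatMap (fun tc => (matchIdx c tc).map (fun i => PySem.List.pyGetD s i 0)),
         orderOfChromosomes.flatMap (fun tc => (matchIdx c tc).map (fun i => PySem.List.pyGetD e i 0))) := by
  unfold sort_input
  have h1 : ∀ (tc : String) (acc : List String × List Int × List Int),
      (PySem.List.pyRange 0 (c.length : Int) 1).foldl (fun acc2 i =>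
        if PySem.List.pyGetD c i "" == tc then
          (acc2.1 ++ [PySem.List.pyGetD c i ""],
           acc2.2.1 ++ [PySem.List.pyGetD s i 0],
           acc2.2.2 ++ [PySem.List.pyGetD e i 0])
        else acc2) acc
      = (acc.1 ++ (matchIdx c tc).map (fun i => PySem.List.pyGetD c i ""),
         acc.2.1 ++ (matchIdx c tc).map (fun i => PySem.List.pyGetD s i 0),
         acc.2.2 ++ (matchIdx c tc).map (fun i => PySem.List.pyGetD e i 0)) := by
    intro tc acc
    exact inner_fold_eq _ _ _ _ _ acc
  calc orderOfChromosomes.foldl _ ([], [], [])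
      = orderOfChromosomes.foldl (fun acc tc =>
          (acc.1 ++ (matchIdx c tc).map (fun i => PySem.List.pyGetD c i ""),
           acc.2.1 ++ (matchIdx c tc).map (fun i => PySem.List.pyGetD s i 0),
           acc.2.2 ++ (matchIdx c tc).map (fun i => PySem.List.pyGetD e i 0))) ([], [], []) := by
        exact PySem.List.foldl_congr_mem _ _ _ _ (fun acc tc _ => h1 tc acc)
    _ = _ := by rw [outer_fold_eq]; simp

-- flatMap respects pointwise equality on members
theorem flatMap_congr_mem {α β : Type} (l : List α) (f g : α → List β)
    (h : ∀ x ∈ l, f x = g x) : l.flatMap f = l.flatMap g := by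
  induction l with
  | nil => rfl
  | cons x xs ih =>
    simp only [List.flatMap_cons, h x (List.mem_cons_self), ih (fun y hy => h y (List.mem_cons_of_mem _ hy))]

-- B's buckets hold exactly the matching indices, for each canonical chromosome
theorem bucket_eq (c : List String) (tc : String) (htc : tc ∈ orderOfChromosomes) :
    ((PySem.List.enumerate c 0).foldl (fun d p =>
        if (PySem.Set.ofList orderOfChromosomes).contains p.2 then d.modify p.2 [] (· ++ [p.1]) else d)
      PySem.Dict.empty).getD tc []
      = matchIdx c tc := by
  rw [PySem.List.foldl_if_eq_foldl_filter]
  have hswap : ((PySem.List.enumerate c 0).filter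
        (fun p => (PySem.Set.ofList orderOfChromosomes).contains p.2)).foldl
        (fun d p => d.modify p.2 [] (· ++ [p.1])) PySem.Dict.empty
      = (((PySem.List.enumerate c 0).filter
        (fun p => (PySem.Set.ofList orderOfChromosomes).contains p.2)).map Prod.swap).foldl
        (fun d q => d.modify q.1 [] (· ++ [q.2])) PySem.Dict.empty := by
    rw [List.foldl_map]
    simp
  rw [hswap, PySem.Dict.getD_foldl_modify_append, PySem.Dict.getD_empty]
  simp only [List.nil_append, List.filter_map, Function.comp_def, Prod.fst_swap, List.map_map,
    Prod.snd_swap]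
  rw [List.filter_filter]
  have hfc : ∀ p ∈ PySem.List.enumerate c 0,
      (((p : Int × String).2 == tc) && (PySem.Set.ofList orderOfChromosomes).contains p.2)
        = (p.2 == tc) := by
    intro p _
    by_cases hp : p.2 = tc
    · subst hp
      simp [PySem.Set.contains, PySem.Set.mem_ofList, htc]
    · simp [hp]
  rw [List.filter_congr hfc]
  rw [PySem.List.enumerate_eq_map_pyRange (d := "")]
  simp only [List.filter_map, Function.comp_def, List.map_map]
  unfold matchIdx
  simp

theorem sort_input_spec : Claim_equal_sort_input := by
  intro c s e _ _
  unfold Spec_sort_input sort_input_alt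
  rw [sort_input_eq]
  have hidx : orderOfChromosomes.flatMap (fun ch =>
      (((PySem.List.enumerate c 0).foldl (fun d p =>
        if (PySem.Set.ofList orderOfChromosomes).contains p.2 then d.modify p.2 [] (· ++ [p.1]) else d)
        PySem.Dict.empty).getD ch []))
      = orderOfChromosomes.flatMap (matchIdx c) :=
    flatMap_congr_mem _ _ _ (fun tc htc => bucket_eq c tc htc)
  simp only [hidx, List.map_flatMap]
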